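-- pv_equiv track=rewrite | github.com/PossiblyKozak/advent_of_code_2023 | 4/4.py | solve_cards
-- ===== SOURCE A (Python) =====
-- def solve_cards(cards: list):
--     points = 0
--     ci = {}
--     for card_index in range(len(cards)):
--         winner_count = 0
--         new_points = 0
--         winners = cards[card_index][0]
--         your_nums = cards[card_index][1]
--         for num in your_nums:
--             if num in winners:
--                 winner_count += 1
--
--         ci[card_index] = winner_count
--         if winner_count > 0:
--             new_points = 2 ** (winner_count - 1)
--         points += new_points
--
--     totals = {0:ci[0]}
--     for i in range(len(cards)):
--         totals[i] = 1
--     for i in range(len(cards)):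
--         for j in range(i+1, i + ci[i] + 1):
--             totals[j] += totals[i]
--
--     card_count = []
--     for i in range(len(cards)):
--         card_count.append(totals[i])
--
--     return points, sum(card_count)
-- ===== SOURCE B (Python) =====
-- def solve_cards(cards: list):
--     n = len(cards)
--     points = 0
--     wc = []
--     for card in cards:
--         winners = card[0]
--         c = 0
--         for num in card[1]:
--             if num in winners:
--                 c += 1
--         wc.append(c)
--         if c > 0:
--             points += 2 ** (c - 1)
--     # one forward pass with a difference array instead of the per-card inner push loop
--     diff = [0] * (n + 1)
--     acc = 0
--     total = 0
--     for i in range(n):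
--         acc += diff[i]
--         t = 1 + acc
--         total += t
--         c = wc[i]
--         if c > 0:
--             diff[i + 1] += t
--             diff[min(i + c + 1, n)] -= t
--     return points, total
-- ===== Notes on version B (the rewrite author's own statement) =====
-- stated objective: alternative
-- what changed: Phase 2's per-card inner loop that pushes copy counts into a totals dict is replaced by a single forward pass using a difference array and a running prefix sum (and phase 1 folds over the cards themselves instead of indexing a dict by position).
import Mathlib
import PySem

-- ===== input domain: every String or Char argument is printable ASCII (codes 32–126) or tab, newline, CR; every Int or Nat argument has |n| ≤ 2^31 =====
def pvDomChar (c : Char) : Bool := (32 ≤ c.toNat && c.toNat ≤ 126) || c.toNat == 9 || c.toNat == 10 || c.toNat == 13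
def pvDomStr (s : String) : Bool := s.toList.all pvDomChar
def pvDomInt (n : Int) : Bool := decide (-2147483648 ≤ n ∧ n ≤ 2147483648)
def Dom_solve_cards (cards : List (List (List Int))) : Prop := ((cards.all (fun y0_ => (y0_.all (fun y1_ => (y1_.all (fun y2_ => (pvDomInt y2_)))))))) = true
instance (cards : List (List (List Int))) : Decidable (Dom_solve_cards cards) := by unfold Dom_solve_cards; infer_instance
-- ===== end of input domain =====

-- B replaces A's per-card inner copy-push loop over a totals dict by a single forward pass
-- with a difference array and a running prefix sum (alternative decomposition).

-- ===== PORT A =====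
def aPhase1Step (cards : List (List (List Int))) (st : Int × PySem.Dict Int Int)
    (card_index : Nat) : Int × PySem.Dict Int Int :=
  let card := PySem.List.pyGetD cards (card_index : Int) []
  let winners := PySem.List.pyGetD card 0 []
  let your_nums := PySem.List.pyGetD card 1 []
  let winner_count := your_nums.foldl
    (fun wcount num => if winners.contains num then wcount + 1 else wcount) (0 : Int)
  let ci := st.2.insert (card_index : Int) winner_count
  let new_points : Int := if winner_count > 0 then 2 ^ (winner_count - 1).toNat else 0
  (st.1 + new_points, ci)

def aPhase1 (cards : List (List (List Int))) : Int × PySem.Dict Int Int :=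
  (List.range cards.length).foldl (aPhase1Step cards) (0, PySem.Dict.empty)

def aInitTotals (cards : List (List (List Int))) (ci : PySem.Dict Int Int) : PySem.Dict Int Int :=
  (List.range cards.length).foldl (fun t (i : Nat) => t.insert (i : Int) 1)
    (PySem.Dict.empty.insert 0 (ci.getD 0 0))

def aPush (ci : PySem.Dict Int Int) (t : PySem.Dict Int Int) (i : Nat) : PySem.Dict Int Int :=
  (PySem.List.pyRange ((i : Int) + 1) ((i : Int) + ci.getD (i : Int) 0 + 1) 1).foldl
    (fun t j => t.insert j (t.getD j 0 + t.getD (i : Int) 0)) t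

def solve_cards (cards : List (List (List Int))) : Int × Int :=
  let st1 := aPhase1 cards
  let totals := (List.range cards.length).foldl (aPush st1.2) (aInitTotals cards st1.2)
  let card_count := (List.range cards.length).foldl (fun l (i : Nat) => l ++ [totals.getD (i : Int) 0]) []
  (st1.1, card_count.sum)

-- ===== PORT B =====
def bCardStep (st : Int × List Int) (card : List (List Int)) : Int × List Int :=
  let winners := PySem.List.pyGetD card 0 []
  let c := (PySem.List.pyGetD card 1 []).foldl
    (fun c num => if winners.contains num then c + 1 else c) (0 : Int)
  let points := if c > 0 then st.1 + 2 ^ (c - 1).toNat else st.1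
  (points, st.2 ++ [c])

def bStep (wc : List Int) (n : Nat) (st : List Int × Int × Int) (i : Nat) :
    List Int × Int × Int :=
  let acc := st.2.1 + st.1.getD i 0
  let t := 1 + acc
  let total := st.2.2 + t
  let c := PySem.List.pyGetD wc (i : Int) 0
  if c > 0 then
    let diff := st.1.set (i + 1) (st.1.getD (i + 1) 0 + t)
    let e := min ((i : Int) + c + 1) (n : Int)
    let diff := PySem.List.pySetD diff e (PySem.List.pyGetD diff e 0 - t)
    (diff, acc, total)
  else (st.1, acc, total)

def solve_cards_alt (cards : List (List (List Int))) : Int × Int :=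
  let n := cards.length
  let st1 := cards.foldl bCardStep (0, [])
  let st2 := (List.range n).foldl (bStep st1.2 n) (List.replicate (n + 1) 0, 0, 0)
  (st1.1, st2.2.2)

-- ===== PRECONDITION & SPEC =====
-- pvWc cards i = how many of card i's own numbers appear among its winners
def pvWc (cards : List (List (List Int))) (i : Nat) : Nat :=
  (((cards.getD i []).getD 1 []).filter
    (fun x => ((cards.getD i []).getD 0 []).contains x)).length

-- Pre_ excludes exactly the inputs on which the Python A raises: an empty card list
-- (KeyError on ci[0]), a card with fewer than two inner lists (IndexError), and a card
-- whose match count would push copies past the last card (KeyError on totals[j]).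
def Pre_solve_cards (cards : List (List (List Int))) : Prop :=
  cards ≠ [] ∧ (∀ card ∈ cards, 2 ≤ card.length) ∧
  (∀ i < cards.length, pvWc cards i = 0 ∨ i + pvWc cards i < cards.length)
instance (cards : List (List (List Int))) : Decidable (Pre_solve_cards cards) := by
  unfold Pre_solve_cards; infer_instance

def pvWitness_solve_cards : List (List (List Int)) := [[[1], [1, 2]], [[], []]]

def Spec_solve_cards (cards : List (List (List Int))) (out : Int × Int) : Prop := out = solve_cards_alt cards
instance (cards : List (List (List Int))) (out : Int × Int) : Decidable (Spec_solve_cards cards out) := by unfold Spec_solve_cards; infer_instance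

-- ===== CLAIM (what is proved, stated in full; the proofs are below) =====
def Claim_equal_solve_cards : Prop := ∀ (cards : List (List (List Int))), Dom_solve_cards cards → Pre_solve_cards cards → Spec_solve_cards cards (solve_cards cards)

-- ===== LEMMAS AND PROOFS =====

-- per-card match count / points, as functions of the card itself
def cardCnt (card : List (List Int)) : Int :=
  (((card.getD 1 []).filter (fun x => (card.getD 0 []).contains x)).length : Int)

def cardPt (card : List (List Int)) : Int :=
  if 0 < cardCnt card then 2 ^ (cardCnt card - 1).toNat else 0

-- the mathematical copy count of card j (forward-push characterisation)
def Tf (w : Nat → Nat) (j : Nat) : Int :=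
  1 + ∑ i ∈ (Finset.range j).attach, (if j ≤ i.1 + w i.1 then Tf w i.1 else 0)
termination_by j
decreasing_by exact Finset.mem_range.mp i.2

lemma Tf_eq (w : Nat → Nat) (j : Nat) :
    Tf w j = 1 + ∑ i ∈ Finset.range j, (if j ≤ i + w i then Tf w i else 0) := by
  rw [Tf, ← Finset.sum_attach (Finset.range j) (fun i => if j ≤ i + w i then Tf w i else 0)]

-- value of totals[j] after the first m outer push iterations
def Phi (w : Nat → Nat) (m j : Nat) : Int :=
  1 + ∑ i ∈ Finset.range m, (if i < j ∧ j ≤ i + w i then Tf w i else 0)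

lemma Phi_self (w : Nat → Nat) (m j : Nat) (h : j ≤ m) : Phi w m j = Tf w j := by
  rw [Phi, Tf_eq]
  congr 1
  rw [← Finset.sum_subset ((by intro x hx; simp only [Finset.mem_range] at hx ⊢; omega : Finset.range j ⊆ Finset.range m))]
  · exact Finset.sum_congr rfl (fun i hi => by
      simp only [Finset.mem_range] at hi
      simp [hi])
  · intro i _ hi
    simp only [Finset.mem_range, not_lt] at hi
    have hne : ¬ (i < j ∧ j ≤ i + w i) := by omega
    simp [hne]

lemma foldl_count (ws : List Int) (ys : List Int) (c0 : Int) :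
    ys.foldl (fun c num => if ws.contains num then c + 1 else c) c0
      = c0 + ((ys.filter (fun x => ws.contains x)).length : Int) := by
  induction ys generalizing c0 with
  | nil => simp
  | cons y ys ih =>
    simp only [List.foldl_cons, List.filter_cons]
    by_cases h : ws.contains y
    · simp only [h, if_true, ih, List.length_cons]; push_cast; ring
    · simp only [h, Bool.false_eq_true, if_false, ih]

lemma cardCnt_getD (cards : List (List (List Int))) (i : Nat) :
    cardCnt (cards.getD i []) = (pvWc cards i : Int) := rfl

lemma map_getD_range {α : Type} (l : List α) (d : α) :
    (List.range l.length).map (fun i => l.getD i d) = l := by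
  apply List.ext_getElem
  · simp
  · intro i h1 h2
    simp [List.getD_eq_getElem?_getD, List.getElem?_eq_getElem h2]

lemma sum_map_range_eq (f : Nat → Int) (n : Nat) :
    ((List.range n).map f).sum = ∑ i ∈ Finset.range n, f i := by
  induction n with
  | zero => simp
  | succ n ih => simp [List.range_succ, Finset.sum_range_succ, ih]

lemma aPhase1_pref (cards : List (List (List Int))) (m : Nat) :
    ((List.range m).foldl (aPhase1Step cards) (0, PySem.Dict.empty)).1
        = ((List.range m).map (fun i => cardPt (cards.getD i []))).sum
    ∧ ∀ i : Nat, ((List.range m).foldl (aPhase1Step cards) (0, PySem.Dict.empty)).2.getD (i : Int) 0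
        = if i < m then cardCnt (cards.getD i []) else 0 := by
  induction m with
  | zero => simp
  | succ m ih =>
    rw [List.range_succ, List.foldl_append, List.foldl_cons, List.foldl_nil]
    obtain ⟨ih1, ih2⟩ := ih
    have hcard : PySem.List.pyGetD cards ((m : Nat) : Int) [] = cards.getD m [] := by simp
    have hc : (PySem.List.pyGetD (PySem.List.pyGetD cards ((m : Nat) : Int) []) 1 []).foldl
        (fun c num =>
          if (PySem.List.pyGetD (PySem.List.pyGetD cards ((m : Nat) : Int) []) 0 []).contains num
          then c + 1 else c) (0 : Int) = cardCnt (cards.getD m []) := by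
      rw [foldl_count, hcard]
      simp [cardCnt, PySem.List.pyGetD_ofNat']
    rw [aPhase1Step]
    simp only [hc]
    constructor
    · rw [List.map_append, List.sum_append, ih1]
      simp only [List.map_cons, List.map_nil, List.sum_cons, List.sum_nil]
      rw [cardPt]
      by_cases h : 0 < cardCnt (cards.getD m [])
      · simp
      · simp
    · intro i
      rw [PySem.Dict.getD_insert, ih2]
      by_cases hx : i = m
      · simp [hx]
      · have hne : ¬ ((i : Int) = (m : Int)) := by exact_mod_cast hx
        simp only [hne, if_false]
        by_cases h1 : i < m
        · simp [h1]; omega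
        · simp [h1]; omega

lemma bPhase1_eq (cards : List (List (List Int))) (p0 : Int) (l0 : List Int) :
    cards.foldl bCardStep (p0, l0) = (p0 + (cards.map cardPt).sum, l0 ++ cards.map cardCnt) := by
  induction cards generalizing p0 l0 with
  | nil => simp
  | cons card cards ih =>
    rw [List.foldl_cons, bCardStep, ih]
    have hc : (PySem.List.pyGetD card 1 []).foldl
        (fun c num => if (PySem.List.pyGetD card 0 []).contains num then c + 1 else c) (0 : Int)
        = cardCnt card := by
      rw [foldl_count]
      simp [cardCnt, PySem.List.pyGetD_ofNat']
    rw [hc]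
    simp only [List.map_cons, List.sum_cons, Prod.mk.injEq]
    constructor
    · rw [cardPt]
      by_cases h : 0 < cardCnt card
      · simp [h]; ring
      · simp [h]
    · simp

lemma push_loop (L : List Int) (t : PySem.Dict Int Int) (k : Int) (hk : k ∉ L) (hnd : L.Nodup)
    (x : Int) :
    (L.foldl (fun t j => t.insert j (t.getD j 0 + t.getD k 0)) t).getD x 0
      = t.getD x 0 + (if x ∈ L then t.getD k 0 else 0) := by
  induction L generalizing t with
  | nil => simp
  | cons j L ih =>
    simp only [List.mem_cons, not_or] at hk
    obtain ⟨hkj, hkL⟩ := hk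
    have hjL : j ∉ L := (List.nodup_cons.mp hnd).1
    have hndL : L.Nodup := (List.nodup_cons.mp hnd).2
    rw [List.foldl_cons, ih _ hkL hndL, PySem.Dict.getD_insert, PySem.Dict.getD_insert]
    by_cases hx : x = j
    · subst hx
      simp [hjL]
    · simp [hx, hkj]

lemma init_pref (d0 : PySem.Dict Int Int) (m j : Nat) :
    ((List.range m).foldl (fun t (i : Nat) => t.insert (i : Int) 1) d0).getD (j : Int) 0
      = if j < m then 1 else d0.getD (j : Int) 0 := by
  induction m with
  | zero => simp
  | succ m ih =>
    rw [List.range_succ, List.foldl_append, List.foldl_cons, List.foldl_nil,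
      PySem.Dict.getD_insert, ih]
    by_cases hx : j = m
    · simp [hx]
    · have hne : ¬ ((j : Int) = (m : Int)) := by exact_mod_cast hx
      simp [hne]
      omega

lemma aInit_getD (cards : List (List (List Int))) (ci : PySem.Dict Int Int) (j : Nat)
    (hj : j < cards.length) : (aInitTotals cards ci).getD (j : Int) 0 = 1 := by
  rw [aInitTotals, init_pref, if_pos hj]

lemma aTotals_inv (cards : List (List (List Int))) (ci : PySem.Dict Int Int)
    (hci : ∀ i : Nat, ci.getD (i : Int) 0 = if i < cards.length then (pvWc cards i : Int) else 0)
    (m : Nat) (hm : m ≤ cards.length) :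
    ∀ j : Nat, j < cards.length →
      (((List.range m).foldl (aPush ci) (aInitTotals cards ci)).getD (j : Int) 0)
        = Phi (pvWc cards) m j := by
  revert hm
  induction m with
  | zero =>
    intro _ j hj
    rw [List.range_zero, List.foldl_nil, aInit_getD cards ci j hj]
    simp [Phi]
  | succ m ih =>
    intro hm j hj
    have hm' : m ≤ cards.length := by omega
    rw [List.range_succ, List.foldl_append, List.foldl_cons, List.foldl_nil, aPush]
    have hcim : ci.getD ((m : Nat) : Int) 0 = (pvWc cards m : Int) := by
      rw [hci]; simp [Nat.lt_of_succ_le hm]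
    rw [hcim]
    set L := PySem.List.pyRange (((m : Nat) : Int) + 1)
      (((m : Nat) : Int) + (pvWc cards m : Int) + 1) 1 with hL
    have hkL : ((m : Nat) : Int) ∉ L := by
      rw [hL]
      intro hmem
      rw [PySem.List.mem_pyRange_one] at hmem
      omega
    have hnd : L.Nodup := by rw [hL]; exact PySem.List.nodup_pyRange_one _ _
    rw [push_loop L _ _ hkL hnd, ih hm' j hj, ih hm' m (by omega), Phi_self _ _ _ le_rfl]
    have hmemiff : ((j : Nat) : Int) ∈ L ↔ (m < j ∧ j ≤ m + pvWc cards m) := by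
      rw [hL, PySem.List.mem_pyRange_one]
      constructor <;> intro h <;> push_cast at h ⊢ <;> omega
    have hstep : Phi (pvWc cards) (m + 1) j
        = Phi (pvWc cards) m j
          + (if m < j ∧ j ≤ m + pvWc cards m then Tf (pvWc cards) m else 0) := by
      rw [Phi, Phi, Finset.sum_range_succ]
      ring
    rw [hstep]
    congr 1
    simp only [hmemiff]

def bInv (cards : List (List (List Int))) (m : Nat) (st : List Int × Int × Int) : Prop :=
  st.1.length = cards.length + 1 ∧
  st.2.2 = ∑ j ∈ Finset.range m, Tf (pvWc cards) j ∧
  ∀ j : Nat, m ≤ j → j < cards.length →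
    st.2.1 + ∑ k ∈ Finset.Icc m j, st.1.getD k 0
      = ∑ i ∈ Finset.range m, (if j ≤ i + pvWc cards i then Tf (pvWc cards) i else 0)

lemma sum_Icc_bot (a b : Nat) (f : Nat → Int) (h : a ≤ b) :
    ∑ i ∈ Finset.Icc a b, f i = f a + ∑ i ∈ Finset.Icc (a + 1) b, f i := by
  rw [Finset.Icc_add_one_left_eq_Ioc, ← Finset.Icc_erase_left]
  exact (Finset.add_sum_erase _ f (Finset.mem_Icc.mpr ⟨le_rfl, h⟩)).symm

lemma getD_set_eq (l : List Int) (i : Nat) (v : Int) (h : i < l.length) :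
    (l.set i v).getD i 0 = v := by
  simp [List.getD_eq_getElem?_getD, h]

lemma getD_set_ne (l : List Int) (i j : Nat) (v : Int) (h : i ≠ j) :
    (l.set i v).getD j 0 = l.getD j 0 := by
  simp [List.getD_eq_getElem?_getD, h]

lemma getD_replicate_zero (k n' : Nat) : (List.replicate n' (0 : Int)).getD k 0 = 0 := by
  simp [List.getD_eq_getElem?_getD, List.getElem?_replicate]
  split <;> rfl

lemma wc_getD (cards : List (List (List Int))) (i : Nat) (hi : i < cards.length) :
    PySem.List.pyGetD (cards.map cardCnt) ((i : Nat) : Int) 0 = (pvWc cards i : Int) := by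
  rw [PySem.List.pyGetD_natCast]
  rw [List.getD_eq_getElem _ _ (by simpa using hi)]
  rw [List.getElem_map, ← cardCnt_getD]
  congr 1
  exact (List.getD_eq_getElem _ _ hi).symm

lemma bStep_inv (cards : List (List (List Int))) (m : Nat) (st : List Int × Int × Int)
    (hinv : bInv cards m st) (hmn : m < cards.length) :
    bInv cards (m + 1) (bStep (cards.map cardCnt) cards.length st m) := by
  obtain ⟨hlen, htot, hsum⟩ := hinv
  have hwc := wc_getD cards m hmn
  have haccm : st.2.1 + st.1.getD m 0
      = ∑ i ∈ Finset.range m, (if m ≤ i + pvWc cards i then Tf (pvWc cards) i else 0) := by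
    have := hsum m le_rfl hmn
    simpa [Finset.Icc_self] using this
  have ht : 1 + (st.2.1 + st.1.getD m 0) = Tf (pvWc cards) m := by
    rw [haccm, Tf_eq]
  simp only [bStep, hwc]
  by_cases h0 : 0 < pvWc cards m
  · have hcpos : ((pvWc cards m : Int) > 0) := by exact_mod_cast h0
    rw [if_pos hcpos]
    have he : min (((m : Nat) : Int) + (pvWc cards m : Int) + 1) ((cards.length : Nat) : Int)
        = ((min (m + pvWc cards m + 1) cards.length : Nat) : Int) := by
      push_cast; rfl
    rw [he, PySem.List.pySetD_natCast, PySem.List.pyGetD_natCast]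
    set t := 1 + (st.2.1 + st.1.getD m 0) with hts
    set eN := min (m + pvWc cards m + 1) cards.length with heN
    set diff1 := st.1.set (m + 1) (st.1.getD (m + 1) 0 + t) with hd1
    have hlen1 : diff1.length = cards.length + 1 := by rw [hd1, List.length_set, hlen]
    refine ⟨?_, ?_, ?_⟩
    · rw [List.length_set, hlen1]
    · rw [htot, ht, Finset.sum_range_succ]
    · intro j hj hjn
      have hm2 : m + 2 ≤ eN := by omega
      have heNlen : eN < diff1.length := by omega
      have hdiff2 : ∀ k, k < cards.length →
          (diff1.set eN (diff1.getD eN 0 - t)).getD k 0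
            = st.1.getD k 0 + (if k = m + 1 then t else 0) + (if k = eN then -t else 0) := by
        intro k hk
        by_cases hke : k = eN
        · subst hke
          rw [getD_set_eq _ _ _ heNlen, hd1, getD_set_ne _ _ _ _ (by omega)]
          have hne : ¬ (eN = m + 1) := by omega
          simp [hne]
          ring
        · rw [getD_set_ne _ _ _ _ (Ne.symm hke)]
          by_cases hkm : k = m + 1
          · subst hkm
            rw [hd1, getD_set_eq _ _ _ (by omega)]
            simp [hke]
          · rw [hd1, getD_set_ne _ _ _ _ (Ne.symm hkm)]
            simp [hkm, hke]
      have hsum2 : ∑ k ∈ Finset.Icc (m + 1) j, (diff1.set eN (diff1.getD eN 0 - t)).getD k 0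
          = (∑ k ∈ Finset.Icc (m + 1) j, st.1.getD k 0) + t
            + (if eN ≤ j then -t else 0) := by
        rw [Finset.sum_congr rfl (fun k hk => hdiff2 k (by
          rcases Finset.mem_Icc.mp hk with ⟨_, h2⟩; omega))]
        rw [Finset.sum_add_distrib, Finset.sum_add_distrib,
          Finset.sum_ite_eq' (Finset.Icc (m + 1) j) (m + 1) (fun _ => t),
          Finset.sum_ite_eq' (Finset.Icc (m + 1) j) eN (fun _ => -t)]
        have h1 : m + 1 ∈ Finset.Icc (m + 1) j := Finset.mem_Icc.mpr ⟨le_rfl, hj⟩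
        have h2 : eN ∈ Finset.Icc (m + 1) j ↔ eN ≤ j := by
          rw [Finset.mem_Icc]; omega
        rw [if_pos h1]
        by_cases h3 : eN ≤ j
        · rw [if_pos (h2.mpr h3), if_pos h3]
        · rw [if_neg (fun hmem => h3 (h2.mp hmem)), if_neg h3]
      rw [hsum2]
      have hold := hsum j (by omega) hjn
      rw [sum_Icc_bot m j _ (by omega)] at hold
      rw [Finset.sum_range_succ]
      have hiff : (eN ≤ j) ↔ ¬ (j ≤ m + pvWc cards m) := by omega
      by_cases hc : j ≤ m + pvWc cards m
      · rw [if_pos hc, if_neg (by omega : ¬ eN ≤ j), ← ht]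
        have : st.2.1 + st.1.getD m 0
            + ((∑ k ∈ Finset.Icc (m + 1) j, st.1.getD k 0) + t + 0)
            = (st.2.1 + (st.1.getD m 0 + ∑ k ∈ Finset.Icc (m + 1) j, st.1.getD k 0)) + t := by
          ring
        rw [this, hold]
      · rw [if_neg hc, if_pos (hiff.mpr hc)]
        have : st.2.1 + st.1.getD m 0
            + ((∑ k ∈ Finset.Icc (m + 1) j, st.1.getD k 0) + t + -t)
            = st.2.1 + (st.1.getD m 0 + ∑ k ∈ Finset.Icc (m + 1) j, st.1.getD k 0) := by
          ring
        rw [this, hold, add_zero]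
  · have hcneg : ¬ ((pvWc cards m : Int) > 0) := by exact_mod_cast h0
    rw [if_neg hcneg]
    refine ⟨hlen, ?_, ?_⟩
    · rw [htot, ht, Finset.sum_range_succ]
    · intro j hj hjn
      have hw0 : pvWc cards m = 0 := by omega
      have hold := hsum j (by omega) hjn
      rw [sum_Icc_bot m j _ (by omega)] at hold
      rw [Finset.sum_range_succ, if_neg (by omega : ¬ j ≤ m + pvWc cards m), add_zero, ← hold]
      ring

lemma bPhase2_inv (cards : List (List (List Int))) (m : Nat) (hm : m ≤ cards.length) :
    bInv cards m ((List.range m).foldl (bStep (cards.map cardCnt) cards.length)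
      (List.replicate (cards.length + 1) 0, 0, 0)) := by
  revert hm
  induction m with
  | zero =>
    intro _
    simp only [List.range_zero, List.foldl_nil]
    refine ⟨by simp, by simp, ?_⟩
    intro j _ _
    rw [Finset.sum_congr rfl (fun k _ => getD_replicate_zero k (cards.length + 1))]
    simp
  | succ m ih =>
    intro hm
    rw [List.range_succ, List.foldl_append, List.foldl_cons, List.foldl_nil]
    exact bStep_inv cards m _ (ih (by omega)) hm

-- ===== VERDICT (by name: the statement is the Claim_ definition above) =====
theorem solve_cards_spec : Claim_equal_solve_cards := by
  intro cards _ _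
  unfold Spec_solve_cards solve_cards solve_cards_alt
  simp only [aPhase1]
  rw [bPhase1_eq cards 0 []]
  simp only [zero_add, List.nil_append]
  obtain ⟨hA1, hA2⟩ := aPhase1_pref cards cards.length
  have hci : ∀ i : Nat,
      ((List.range cards.length).foldl (aPhase1Step cards) (0, PySem.Dict.empty)).2.getD (i : Int) 0
        = if i < cards.length then (pvWc cards i : Int) else 0 := by
    intro i
    rw [hA2 i]
    rfl
  have htot := aTotals_inv cards _ hci cards.length le_rfl
  have hbinv := bPhase2_inv cards cards.length le_rfl
  obtain ⟨_, hbtot, _⟩ := hbinv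
  rw [PySem.List.foldl_append_singleton_eq_map, List.nil_append, Prod.mk.injEq]
  constructor
  · rw [hA1]
    rw [show (fun i => cardPt (cards.getD i [])) = (cardPt ∘ fun i => cards.getD i []) from rfl,
      ← List.map_map, map_getD_range]
  · rw [sum_map_range_eq, hbtot]
    apply Finset.sum_congr rfl
    intro i hi
    rw [htot i (Finset.mem_range.mp hi),
      Phi_self (pvWc cards) cards.length i (le_of_lt (Finset.mem_range.mp hi))]
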